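-- pv_equiv track=rewrite | github.com/ket0825/baekjoon_algorithm | retry/candy_game3085.py | count_consecutive_color
-- ===== SOURCE A (Python) =====
-- def count_consecutive_color(mat):
--     consecutive_color_count_list = []
--     for row in mat:
--         consecutive_color_count = 0
--         cur_color = None
--         prev_color = None
--         for col in row:
--             cur_color = col
--             if cur_color != prev_color and prev_color != None:
--                 consecutive_color_count_list.append(consecutive_color_count)
--                 consecutive_color_count = 1
--                 prev_color = cur_color
--             else:
--                 prev_color = cur_color
--                 consecutive_color_count+=1
--         consecutive_color_count_list.append(consecutive_color_count)
--
--     return consecutive_color_count_list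
-- ===== SOURCE B (Python) =====
-- def _runs(row):
--     # run lengths of a row, extracting one maximal leading run at a time
--     out = []
--     while row:
--         head = row[0]
--         k = 0
--         while k < len(row) and row[k] == head:
--             k += 1
--         out.append(k)
--         row = row[k:]
--     return out
--
--
-- def count_consecutive_color(mat):
--     out = []
--     for row in mat:
--         out += _runs(list(row)) or [0]
--     return out
-- ===== Notes on version B (the rewrite author's own statement) =====
-- stated objective: alternative
-- what changed: Replaced A's running-counter/prev-color state machine over each row by extraction of one maximal leading run at a time (count the leading run with an inner scan, emit its length, continue on the sliced-off remainder).
import Mathlib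
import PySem

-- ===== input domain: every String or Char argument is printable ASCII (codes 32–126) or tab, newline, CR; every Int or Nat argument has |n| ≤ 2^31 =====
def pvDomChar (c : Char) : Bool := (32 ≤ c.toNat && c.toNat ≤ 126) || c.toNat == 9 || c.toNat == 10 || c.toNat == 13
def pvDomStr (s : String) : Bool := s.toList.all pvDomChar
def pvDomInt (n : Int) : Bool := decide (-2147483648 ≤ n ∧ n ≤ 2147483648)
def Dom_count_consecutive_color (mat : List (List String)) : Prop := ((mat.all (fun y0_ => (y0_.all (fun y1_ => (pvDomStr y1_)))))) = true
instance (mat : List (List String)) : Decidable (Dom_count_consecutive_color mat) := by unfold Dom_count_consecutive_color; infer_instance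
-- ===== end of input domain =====

-- B replaces A's running-counter state machine by recursive extraction of one maximal run
-- at a time (objective: alternative decomposition, same cost).

-- ===== PORT A =====
-- inner loop state: (result list so far, consecutive_color_count, prev_color)
def cccStep (st : List Int × Int × Option String) (col : String) : List Int × Int × Option String :=
  if some col ≠ st.2.2 ∧ st.2.2 ≠ none then
    (st.1 ++ [st.2.1], 1, some col)
  else
    (st.1, st.2.1 + 1, some col)

def count_consecutive_color (mat : List (List String)) : List Int :=
  mat.foldl (fun acc row =>
    let s := row.foldl cccStep (acc, 0, none)
    s.1 ++ [s.2.1]) []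

-- ===== PORT B =====
-- the outer 'while row' loop threads (out, row); the inner while
-- 'k < len(row) and row[k] == head' counts the leading run of head,
-- i.e. the length of takeWhile (== head) row; row[k:] is drop k row
def runsBIter (out : List Int) (row : List String) : List Int :=
  match row with
  | [] => out
  | head :: rest =>
    let k := ((head :: rest).takeWhile (fun x => x == head)).length
    runsBIter (out ++ [(k : Int)]) ((head :: rest).drop k)
termination_by row.length
decreasing_by
  simp only [List.takeWhile_cons, beq_self_eq_true, if_true, List.length_cons, List.drop_succ_cons,
    List.length_drop]
  omega

def count_consecutive_color_alt (mat : List (List String)) : List Int :=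
  mat.foldl (fun out row =>
    let rs := runsBIter [] row
    out ++ (if rs.isEmpty then [0] else rs)) []

-- ===== PRECONDITION & SPEC =====
def Spec_count_consecutive_color (mat : List (List String)) (out : List Int) : Prop := out = count_consecutive_color_alt mat
instance (mat : List (List String)) (out : List Int) : Decidable (Spec_count_consecutive_color mat out) := by unfold Spec_count_consecutive_color; infer_instance

-- ===== CLAIM (what is proved, stated in full; the proofs are below) =====
def Claim_equal_count_consecutive_color : Prop := ∀ (mat : List (List String)), Dom_count_consecutive_color mat → Spec_count_consecutive_color mat (count_consecutive_color mat)

-- ===== LEMMAS AND PROOFS =====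

-- non-accumulator form of runsBIter, for the proofs
def runsB (row : List String) : List Int :=
  match row with
  | [] => []
  | head :: rest =>
    let k := ((head :: rest).takeWhile (fun x => x == head)).length
    (k : Int) :: runsB ((head :: rest).drop k)
termination_by row.length
decreasing_by
  simp only [List.takeWhile_cons, beq_self_eq_true, if_true, List.length_cons, List.drop_succ_cons,
    List.length_drop]
  omega


-- reference run-length function: runs of a row whose current run has color p counted cnt times
def runsAux (p : String) (cnt : Int) : List String → List Int
  | [] => [cnt]
  | c :: rest => if c = p then runsAux p (cnt + 1) rest else cnt :: runsAux c 1 rest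

theorem foldA_runsAux (row : List String) (lst : List Int) (cnt : Int) (p : String) :
    (row.foldl cccStep (lst, cnt, some p)).1 ++ [(row.foldl cccStep (lst, cnt, some p)).2.1]
      = lst ++ runsAux p cnt row := by
  induction row generalizing lst cnt p with
  | nil => simp [runsAux]
  | cons c rest ih =>
    by_cases h : c = p
    · subst h
      simp [List.foldl_cons, cccStep, runsAux, ih]
    · simp [List.foldl_cons, cccStep, h, runsAux, ih]

theorem runsAux_split (row : List String) (p : String) (cnt : Int) :
    runsAux p cnt row
      = (cnt + ((row.takeWhile (fun x => x == p)).length : Int)) ::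
        (match row.dropWhile (fun x => x == p) with
         | [] => []
         | c :: rest => runsAux c 1 rest) := by
  induction row generalizing cnt with
  | nil => simp [runsAux]
  | cons x xs ih =>
    by_cases h : x = p
    · subst h
      simp only [runsAux, List.takeWhile_cons, beq_self_eq_true, if_true,
        List.dropWhile_cons, List.length_cons, ih]
      congr 1
      push_cast
      ring
    · simp [runsAux, h]

theorem runsB_eq_runsAux_bounded (n : Nat) :
    ∀ row : List String, row.length ≤ n →
      runsB row = (match row with | [] => [] | c :: rest => runsAux c 1 rest) := by
  induction n with
  | zero =>
    intro row hlen
    have : row = [] := List.eq_nil_of_length_eq_zero (Nat.le_zero.mp hlen)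
    subst this
    simp [runsB]
  | succ n ih =>
    intro row hlen
    cases row with
    | nil => simp [runsB]
    | cons head rest =>
      rw [runsB]
      simp only []
      have hdrop : (head :: rest).drop ((head :: rest).takeWhile (fun x => x == head)).length
          = rest.dropWhile (fun x => x == head) := by
        have hdw : (head :: rest).dropWhile (fun x => x == head)
            = rest.dropWhile (fun x => x == head) := by
          simp
        rw [← hdw]
        generalize h1 : (head :: rest).takeWhile (fun x => x == head) = tw
        generalize h2 : (head :: rest).dropWhile (fun x => x == head) = dw
        have h3 : tw ++ dw = head :: rest := by
          rw [← h1, ← h2]; exact List.takeWhile_append_dropWhile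
        rw [← h3, List.drop_left]
      have hlen' : (rest.dropWhile (fun x => x == head)).length ≤ n := by
        have := List.length_dropWhile_le (fun x => x == head) rest
        simp at hlen
        omega
      rw [hdrop, ih _ hlen', runsAux_split rest head 1]
      congr 1
      simp
      omega

theorem runsB_eq_runsAux (row : List String) :
    runsB row = (match row with | [] => [] | c :: rest => runsAux c 1 rest) :=
  runsB_eq_runsAux_bounded row.length row (Nat.le_refl _)

theorem runsBIter_eq_bounded (n : Nat) :
    ∀ (row : List String) (out : List Int), row.length ≤ n →
      runsBIter out row = out ++ runsB row := by
  induction n with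
  | zero =>
    intro row out hlen
    have : row = [] := List.eq_nil_of_length_eq_zero (Nat.le_zero.mp hlen)
    subst this
    simp [runsBIter, runsB]
  | succ n ih =>
    intro row out hlen
    cases row with
    | nil => simp [runsBIter, runsB]
    | cons head rest =>
      rw [runsBIter, runsB]
      have hk : ((head :: rest).takeWhile (fun x => x == head)).length
          = (rest.takeWhile (fun x => x == head)).length + 1 := by
        simp
      have hlen' : ((head :: rest).drop
          ((head :: rest).takeWhile (fun x => x == head)).length).length ≤ n := by
        simp only [List.length_drop, hk]
        simp at hlen ⊢
        omega
      rw [ih _ _ hlen']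
      simp

theorem runsBIter_eq (row : List String) (out : List Int) :
    runsBIter out row = out ++ runsB row :=
  runsBIter_eq_bounded row.length row out (Nat.le_refl _)

theorem row_contrib (row : List String) (acc : List Int) :
    (row.foldl cccStep (acc, 0, none)).1 ++ [(row.foldl cccStep (acc, 0, none)).2.1]
      = acc ++ (if (runsBIter [] row).isEmpty then [0] else runsBIter [] row) := by
  rw [runsBIter_eq]
  simp only [List.nil_append]
  cases row with
  | nil => simp [runsB]
  | cons c rest =>
    have hB := runsB_eq_runsAux (c :: rest)
    simp only [] at hB
    rw [hB]
    have hstep : cccStep (acc, 0, none) c = (acc, 1, some c) := by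
      simp [cccStep]
    rw [List.foldl_cons, hstep, foldA_runsAux]
    have : (runsAux c 1 rest).isEmpty = false := by
      rw [runsAux_split]
      rfl
    rw [this]
    simp

theorem fold_eq (mat : List (List String)) (acc : List Int) :
    mat.foldl (fun acc row =>
        let s := row.foldl cccStep (acc, 0, none)
        s.1 ++ [s.2.1]) acc
      = mat.foldl (fun out row =>
        let rs := runsBIter [] row
        out ++ (if rs.isEmpty then [0] else rs)) acc := by
  induction mat generalizing acc with
  | nil => rfl
  | cons row rows ih =>
    simp only [List.foldl_cons]
    rw [row_contrib row acc]
    exact ih _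

-- ===== VERDICT (by name: the statement is the Claim_ definition above) =====
theorem count_consecutive_color_spec : Claim_equal_count_consecutive_color := by
  intro mat _
  unfold Spec_count_consecutive_color count_consecutive_color count_consecutive_color_alt
  exact fold_eq mat []
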